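-- pv_equiv track=rewrite | github.com/ld18/FoLT | Homework_07.py | get_tagged_with
-- ===== SOURCE A (Python) =====
-- def get_tagged_with(tagged_words, tag_list):
--     # Create set of word types for every tag
--     type_sets = [
--         {word for word, tag2 in tagged_words if tag2 == tag}
--         for tag in tag_list
--     ]
--
--     # Get the intersection of all sets
--     if len(tag_list) == 1:
--         intersection = type_sets[0]
--
--     else:
--         intersection = type_sets[0].intersection(
--             *type_sets[1:]
--         )
--
--
--     # return the sorted intersection of all sets of word types of the given
--     # tags
--     return sorted(list(intersection))
-- ===== SOURCE B (Python) =====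
-- def get_tagged_with(tagged_words, tag_list):
--     # One pass: group word types by tag, then intersect only the needed tags.
--     by_tag = {}
--     for word, tag in tagged_words:
--         by_tag.setdefault(tag, set()).add(word)
--     result = by_tag.get(tag_list[0], set())
--     for tag in tag_list[1:]:
--         result = result & by_tag.get(tag, set())
--     return sorted(result)
-- ===== Notes on version B (the rewrite author's own statement) =====
-- stated objective: faster
-- what changed: Instead of scanning the whole corpus once per tag, B groups word types by tag into a dict in a single pass and intersects only the sets of the requested tags.
import Mathlib
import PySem

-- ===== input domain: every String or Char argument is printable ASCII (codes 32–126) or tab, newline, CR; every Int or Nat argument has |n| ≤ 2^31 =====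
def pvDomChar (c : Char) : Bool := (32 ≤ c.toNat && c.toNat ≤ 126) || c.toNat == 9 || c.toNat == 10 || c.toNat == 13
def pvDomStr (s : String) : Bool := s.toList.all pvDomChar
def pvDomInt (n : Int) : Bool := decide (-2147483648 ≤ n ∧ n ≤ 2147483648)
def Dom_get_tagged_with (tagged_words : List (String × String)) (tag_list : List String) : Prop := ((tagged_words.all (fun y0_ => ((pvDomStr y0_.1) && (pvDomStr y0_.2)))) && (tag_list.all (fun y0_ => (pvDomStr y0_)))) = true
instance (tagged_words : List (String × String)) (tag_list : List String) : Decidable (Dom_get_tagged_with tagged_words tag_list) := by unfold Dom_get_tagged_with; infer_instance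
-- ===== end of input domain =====

-- B replaces A's per-tag scan of the whole corpus by a single grouping pass (tag -> set of word types)
-- followed by intersection of only the requested tags' sets; return value only, no observable mutation.


-- ===== PORT A =====
-- {word for word, tag2 in tagged_words if tag2 == tag}
def pvTypeSet (tagged_words : List (String × String)) (tag : String) : PySem.Set String :=
  PySem.Set.ofList ((tagged_words.filter (fun p => p.2 == tag)).map Prod.fst)

def get_tagged_with (tagged_words : List (String × String)) (tag_list : List String) : List String :=
  let type_sets := tag_list.map (fun tag => pvTypeSet tagged_words tag)
  match type_sets with
  | [] => []  -- unreachable under Pre_: Python's type_sets[0] raises IndexError here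
  | s0 :: rest =>
    -- len(tag_list) == 1: intersection = type_sets[0] is the rest = [] case of the fold;
    -- type_sets[0].intersection(*type_sets[1:]) intersects left to right
    let intersection := rest.foldl PySem.Set.inter s0
    PySem.List.sorted intersection (fun x => x) false

-- ===== PORT B =====
def get_tagged_with_alt (tagged_words : List (String × String)) (tag_list : List String) : List String :=
  -- by_tag.setdefault(tag, set()).add(word)
  let by_tag : PySem.Dict String (PySem.Set String) :=
    tagged_words.foldl (fun d p => d.modify p.2 PySem.Set.empty (fun s => PySem.Set.add s p.1)) PySem.Dict.empty
  match tag_list with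
  | [] => []  -- unreachable under Pre_: Python's tag_list[0] raises IndexError here
  | t :: rest =>
    let result := rest.foldl
      (fun acc tag => PySem.Set.inter acc (by_tag.getD tag PySem.Set.empty))
      (by_tag.getD t PySem.Set.empty)
    PySem.List.sorted result (fun x => x) false

-- ===== PRECONDITION & SPEC =====
-- Pre_ excludes exactly tag_list = [], on which Python A raises IndexError (type_sets[0]).
def Pre_get_tagged_with (tagged_words : List (String × String)) (tag_list : List String) : Prop :=
  tag_list ≠ []
instance (tagged_words : List (String × String)) (tag_list : List String) : Decidable (Pre_get_tagged_with tagged_words tag_list) := by unfold Pre_get_tagged_with; infer_instance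

def pvWitness_get_tagged_with : (List (String × String)) × List String :=
  ([("dog", "NN"), ("runs", "VB"), ("dog", "VB")], ["NN", "VB"])

def Spec_get_tagged_with (tagged_words : List (String × String)) (tag_list : List String) (out : List String) : Prop := out = get_tagged_with_alt tagged_words tag_list
instance (tagged_words : List (String × String)) (tag_list : List String) (out : List String) : Decidable (Spec_get_tagged_with tagged_words tag_list out) := by unfold Spec_get_tagged_with; infer_instance

-- ===== CLAIM (what is proved, stated in full; the proofs are below) =====
def Claim_equal_get_tagged_with : Prop := ∀ (tagged_words : List (String × String)) (tag_list : List String), Dom_get_tagged_with tagged_words tag_list → Pre_get_tagged_with tagged_words tag_list → Spec_get_tagged_with tagged_words tag_list (get_tagged_with tagged_words tag_list)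

-- ===== LEMMAS AND PROOFS =====

-- the grouping dict's entry for `tag` is exactly A's comprehension set for `tag`
theorem pv_getD_group (tagged_words : List (String × String))
    (d : PySem.Dict String (PySem.Set String)) (tag : String) :
    (tagged_words.foldl (fun d p => d.modify p.2 PySem.Set.empty (fun s => PySem.Set.add s p.1)) d).getD tag PySem.Set.empty
      = ((tagged_words.filter (fun p => p.2 == tag)).map Prod.fst).foldl PySem.Set.add (d.getD tag PySem.Set.empty) := by
  induction tagged_words generalizing d with
  | nil => rfl
  | cons p tl ih =>
    simp only [List.foldl_cons, ih, List.filter_cons]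
    by_cases h : p.2 = tag
    · simp [h, PySem.Dict.getD_modify_self]
    · have hb : (p.2 == tag) = false := by simp [h]
      rw [PySem.Dict.getD_modify]
      simp [hb, Ne.symm h]

theorem pv_lookup_eq_typeSet (tagged_words : List (String × String)) (tag : String) :
    (tagged_words.foldl (fun d p => d.modify p.2 PySem.Set.empty (fun s => PySem.Set.add s p.1)) PySem.Dict.empty).getD tag PySem.Set.empty
      = pvTypeSet tagged_words tag := by
  rw [pv_getD_group, pvTypeSet, PySem.Set.ofList_eq_foldl]
  simp [PySem.Dict.getD_empty, PySem.Set.empty]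

-- the two intersection folds coincide, since the dict lookup equals A's comprehension set
theorem pv_fold_eq (tagged_words : List (String × String)) (rest : List String) (s : PySem.Set String) :
    (rest.map (fun tag => pvTypeSet tagged_words tag)).foldl PySem.Set.inter s
      = rest.foldl (fun acc tag => PySem.Set.inter acc
          ((tagged_words.foldl (fun d p => d.modify p.2 PySem.Set.empty (fun s => PySem.Set.add s p.1)) PySem.Dict.empty).getD tag PySem.Set.empty)) s := by
  induction rest generalizing s with
  | nil => rfl
  | cons u us ih => simp only [List.map_cons, List.foldl_cons, pv_lookup_eq_typeSet, ih]

-- ===== VERDICT (by name: the statement is the Claim_ definition above) =====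
theorem get_tagged_with_spec : Claim_equal_get_tagged_with := by
  intro tagged_words tag_list _ hpre
  unfold Spec_get_tagged_with get_tagged_with get_tagged_with_alt
  cases tag_list with
  | nil => exact absurd rfl hpre
  | cons t rest =>
    simp only [List.map_cons]
    rw [pv_lookup_eq_typeSet, ← pv_fold_eq]
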